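-- pv_equiv track=rewrite | github.com/emebedhe/anagrams | sixsolver.py | is_subanagram
-- ===== SOURCE A (Python) =====
-- def is_subanagram(word, anagram):
--     temp_letters = list(anagram)
--     for char in word:
--         if char in temp_letters:
--             temp_letters.remove(char)
--         else:
--             return False
--     return True
-- ===== SOURCE B (Python) =====
-- def is_subanagram(word, anagram):
--     sw = sorted(word)
--     sa = sorted(anagram)
--     j = 0
--     n = len(sa)
--     for c in sw:
--         while j < n and sa[j] < c:
--             j += 1
--         if j >= n or sa[j] != c:
--             return False
--         j += 1
--     return True
-- ===== Notes on version B (the rewrite author's own statement) =====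
-- stated objective: faster
-- what changed: Sorts both strings once and checks multiset containment with a single two-pointer merge scan, replacing A's per-character linear search-and-remove on a scratch list.
import Mathlib
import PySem

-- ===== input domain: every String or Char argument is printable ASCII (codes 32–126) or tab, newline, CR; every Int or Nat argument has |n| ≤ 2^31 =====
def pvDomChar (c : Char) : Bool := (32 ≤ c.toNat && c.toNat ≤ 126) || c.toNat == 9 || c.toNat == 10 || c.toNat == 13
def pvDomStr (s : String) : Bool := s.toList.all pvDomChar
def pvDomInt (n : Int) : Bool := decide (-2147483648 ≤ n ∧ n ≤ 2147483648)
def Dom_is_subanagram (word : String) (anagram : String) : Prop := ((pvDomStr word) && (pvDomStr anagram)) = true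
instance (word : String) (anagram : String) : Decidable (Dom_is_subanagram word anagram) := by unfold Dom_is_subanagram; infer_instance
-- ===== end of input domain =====

-- B sorts both strings once and checks multiset containment with a two-pointer merge scan,
-- replacing A's per-character linear search-and-remove on a scratch list (objective: faster).

-- ===== PORT A =====
-- the for-loop over word with the mutable temp_letters list as state
def pvALoop : List Char → List Char → Bool
  | [], _ => true
  | c :: rest, temp =>
      if temp.contains c then
        pvALoop rest ((PySem.List.remove? temp c).getD temp)  -- temp_letters.remove(char); membership guaranteed by the branch
      else false

def is_subanagram (word : String) (anagram : String) : Bool :=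
  pvALoop word.toList anagram.toList

-- ===== PORT B =====
-- the inner 'while j < n and sa[j] < c: j += 1' — advancing j is dropping from the suffix sa[j:]
def pvSkip (c : Char) : List Char → List Char
  | [] => []
  | x :: xs => if x < c then pvSkip c xs else x :: xs

-- the for-loop over sorted word; the second argument is the suffix sa[j:] of sorted anagram
def pvBLoop : List Char → List Char → Bool
  | [], _ => true
  | c :: rest, sa =>
      match pvSkip c sa with
      | [] => false                                  -- j >= n
      | x :: xs => if x = c then pvBLoop rest xs     -- match: consume, j += 1
                   else false                        -- sa[j] != c

def is_subanagram_alt (word : String) (anagram : String) : Bool :=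
  pvBLoop (PySem.List.sorted word.toList (fun x => x) false)
          (PySem.List.sorted anagram.toList (fun x => x) false)

-- ===== PRECONDITION & SPEC =====
def Spec_is_subanagram (word : String) (anagram : String) (out : Bool) : Prop := out = is_subanagram_alt word anagram
instance (word : String) (anagram : String) (out : Bool) : Decidable (Spec_is_subanagram word anagram out) := by unfold Spec_is_subanagram; infer_instance

-- ===== CLAIM =====
def Claim_equal_is_subanagram : Prop := ∀ (word : String) (anagram : String), Dom_is_subanagram word anagram → Spec_is_subanagram word anagram (is_subanagram word anagram)

-- ===== LEMMAS AND PROOFS =====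

-- the common characterisation: every character occurs in w at most as often as in t
def pvContained (w t : List Char) : Prop := ∀ c : Char, w.count c ≤ t.count c

-- A's loop decides pvContained
theorem pvALoop_iff (w : List Char) :
    ∀ temp : List Char, (pvALoop w temp = true ↔ pvContained w temp) := by
  induction w with
  | nil => intro temp; simp [pvALoop, pvContained]
  | cons c rest ih =>
      intro temp
      by_cases hmem : c ∈ temp
      · have hremove : (PySem.List.remove? temp c).getD temp = temp.erase c := by
          rw [PySem.List.remove?_eq_some_erase temp c hmem]; rfl
        have hcont : temp.contains c = true := by simpa using hmem
        have hpos : 0 < temp.count c := List.count_pos_iff.mpr hmem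
        simp only [pvALoop, hcont, if_true, hremove, ih]
        unfold pvContained
        constructor
        · intro h d
          have hd := h d
          by_cases hdc : d = c
          · subst hdc
            rw [List.count_erase_self] at hd
            rw [List.count_cons_self]
            omega
          · rw [List.count_erase_of_ne hdc] at hd
            rw [List.count_cons_of_ne (Ne.symm hdc)]
            exact hd
        · intro h d
          have hd := h d
          by_cases hdc : d = c
          · subst hdc
            rw [List.count_erase_self]
            rw [List.count_cons_self] at hd
            omega
          · rw [List.count_erase_of_ne hdc]
            rw [List.count_cons_of_ne (Ne.symm hdc)] at hd
            exact hd
      · have hcont : temp.contains c = false := by simpa using hmem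
        have hzero : temp.count c = 0 := List.count_eq_zero.mpr hmem
        simp only [pvALoop, hcont, Bool.false_eq_true, if_false, false_iff]
        intro h
        have := h c
        rw [List.count_cons_self, hzero] at this
        omega

-- pvSkip is a sublist of its input
theorem pvSkip_sublist (c : Char) (sa : List Char) : (pvSkip c sa).Sublist sa := by
  induction sa with
  | nil => simp [pvSkip]
  | cons x xs ih =>
      simp only [pvSkip]
      split_ifs with h
      · exact ih.trans (List.sublist_cons_self x xs)
      · exact List.Sublist.refl _

-- pvSkip's head is not below c
theorem pvSkip_head (c : Char) (sa : List Char) :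
    ∀ x xs, pvSkip c sa = x :: xs → ¬ x < c := by
  induction sa with
  | nil => intro x xs h; simp [pvSkip] at h
  | cons y ys ih =>
      intro x xs h
      simp only [pvSkip] at h
      split_ifs at h with hy
      · exact ih x xs h
      · cases h; exact hy

-- pvSkip only drops characters below c
theorem pvSkip_count (c : Char) (sa : List Char) :
    ∀ x : Char, c ≤ x → (pvSkip c sa).count x = sa.count x := by
  induction sa with
  | nil => intro x _; rfl
  | cons y ys ih =>
      intro x hx
      simp only [pvSkip]
      split_ifs with hy
      · have hne : y ≠ x := fun h => absurd hy (by rw [h]; exact not_lt.mpr hx)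
        rw [List.count_cons_of_ne hne]
        exact ih x hx
      · rfl

-- B's loop decides pvContained on sorted inputs
theorem pvBLoop_iff (sw : List Char) :
    ∀ sa : List Char, sw.Pairwise (· ≤ ·) → sa.Pairwise (· ≤ ·) →
      (pvBLoop sw sa = true ↔ pvContained sw sa) := by
  induction sw with
  | nil => intro sa _ _; simp [pvBLoop, pvContained]
  | cons c rest ih =>
      intro sa hsw hsa
      have hcmin : ∀ x ∈ rest, c ≤ x := fun x hx => List.rel_of_pairwise_cons hsw hx
      have hrest : rest.Pairwise (· ≤ ·) := hsw.of_cons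
      -- counting in sa equals counting in pvSkip c sa, for every character of c :: rest
      have hstep : pvContained (c :: rest) sa ↔ pvContained (c :: rest) (pvSkip c sa) := by
        constructor
        · intro h x
          by_cases hz : (c :: rest).count x = 0
          · omega
          · have hx : x ∈ c :: rest := List.count_pos_iff.mp (Nat.pos_of_ne_zero hz)
            have hcx : c ≤ x := by
              rcases List.mem_cons.mp hx with h1 | h1
              · exact le_of_eq h1.symm
              · exact hcmin x h1
            rw [pvSkip_count c sa x hcx]
            exact h x
        · intro h x
          exact le_trans (h x) ((pvSkip_sublist c sa).count_le x)
      rcases hskip : pvSkip c sa with _ | ⟨x, xs⟩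
      · -- j ran off the end: c has no occurrence left
        simp only [pvBLoop, hskip, Bool.false_eq_true, false_iff]
        intro h
        have := (hstep.mp h) c
        rw [hskip] at this
        simp [List.count_cons_self] at this
      · have hskipsorted : (x :: xs).Pairwise (· ≤ ·) := by
          rw [← hskip]; exact hsa.sublist (pvSkip_sublist c sa)
        by_cases hxc : x = c
        · subst hxc
          simp only [pvBLoop, hskip, if_true]
          rw [ih xs hrest hskipsorted.of_cons, hstep, hskip]
          unfold pvContained
          exact forall_congr' fun d => by
            simp only [List.count_cons]
            exact (Nat.add_le_add_iff_right).symm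
        · -- sa[j] != c: every remaining character exceeds c
          have hcx : c < x := lt_of_le_of_ne (not_lt.mp (pvSkip_head c sa x xs hskip)) (fun h => hxc h.symm)
          have hne : (x = c) = False := by simp [hxc]
          simp only [pvBLoop, hskip, hne, if_false, Bool.false_eq_true, false_iff]
          intro h
          have := (hstep.mp h) c
          rw [hskip] at this
          have hxz : ∀ y ∈ x :: xs, c < y := by
            intro y hy
            rcases List.mem_cons.mp hy with h1 | h1
            · exact h1 ▸ hcx
            · exact lt_of_lt_of_le hcx (List.rel_of_pairwise_cons hskipsorted h1)
          have hzero : (x :: xs).count c = 0 := by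
            apply List.count_eq_zero.mpr
            intro hc
            exact absurd rfl (ne_of_gt (hxz c hc))
          rw [hzero, List.count_cons_self] at this
          omega

-- pvContained only depends on the multisets of its arguments
theorem pvContained_perm {w w' t t' : List Char} (hw : w.Perm w') (ht : t.Perm t') :
    pvContained w t ↔ pvContained w' t' := by
  unfold pvContained
  constructor <;> intro h c
  · rw [← hw.count_eq, ← ht.count_eq]; exact h c
  · rw [hw.count_eq, ht.count_eq]; exact h c

-- ===== VERDICT =====
theorem is_subanagram_spec : Claim_equal_is_subanagram := by
  intro word anagram _
  unfold Spec_is_subanagram is_subanagram is_subanagram_alt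
  rw [Bool.eq_iff_iff]
  rw [pvALoop_iff word.toList anagram.toList]
  rw [pvBLoop_iff _ _ (by simpa using PySem.List.sorted_pairwise word.toList (fun x => x))
       (by simpa using PySem.List.sorted_pairwise anagram.toList (fun x => x))]
  exact (pvContained_perm (PySem.List.sorted_perm word.toList (fun x => x) false)
    (PySem.List.sorted_perm anagram.toList (fun x => x) false)).symm
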